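-- pv_equiv track=rewrite | github.com/hparik11/interview_questions | snapchat_subset_less_than_k.py | find_subsets_with_less_than_k
-- ===== SOURCE A (Python) =====
-- def find_subsets_with_less_than_k(input_array, k):
--
--     filtered_input_array = [value for value in input_array if value < k]
--
--     sorted_input_array = sorted(filtered_input_array)
--
--     subsets = set()
--
--     i = 0
--
--     while i < len(sorted_input_array):
--         j = i
--         while j < len(sorted_input_array):
--             if sorted_input_array[i] + sorted_input_array[j] < k:
--                 if sorted_input_array[i] != sorted_input_array[j]:
--                     subsets.add(tuple((sorted_input_array[i], sorted_input_array[j])))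
--                 subsets.add(tuple(sorted_input_array[i: j+1]))
--
--             j += 1
--         i += 1
--
--     return subsets
-- ===== SOURCE B (Python) =====
-- def find_subsets_with_less_than_k(input_array, k):
--     s = sorted(v for v in input_array if v < k)
--     n = len(s)
--     out = set()
--     for i in range(n):
--         base = s[i]
--         # lower bound: first index in [i, n) whose value is >= k - base
--         lo, hi = i, n
--         while lo < hi:
--             mid = (lo + hi) // 2
--             if s[mid] < k - base:
--                 lo = mid + 1
--             else:
--                 hi = mid
--         prefix = ()
--         for v in s[i:lo]:
--             if v != base:
--                 out.add((base, v))
--             prefix = prefix + (v,)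
--             out.add(prefix)
--     return out
-- ===== Notes on version B (the rewrite author's own statement) =====
-- stated objective: alternative
-- what changed: Instead of A's full scan of all pairs (i,j) with a per-pair threshold test, B binary-searches per i (on the sorted list) for the first partner with s[i]+s[j] >= k and emits the pair/slice tuples unconditionally over that contiguous block; building the output tuples still dominates, so the measured cost is similar.
import Mathlib
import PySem

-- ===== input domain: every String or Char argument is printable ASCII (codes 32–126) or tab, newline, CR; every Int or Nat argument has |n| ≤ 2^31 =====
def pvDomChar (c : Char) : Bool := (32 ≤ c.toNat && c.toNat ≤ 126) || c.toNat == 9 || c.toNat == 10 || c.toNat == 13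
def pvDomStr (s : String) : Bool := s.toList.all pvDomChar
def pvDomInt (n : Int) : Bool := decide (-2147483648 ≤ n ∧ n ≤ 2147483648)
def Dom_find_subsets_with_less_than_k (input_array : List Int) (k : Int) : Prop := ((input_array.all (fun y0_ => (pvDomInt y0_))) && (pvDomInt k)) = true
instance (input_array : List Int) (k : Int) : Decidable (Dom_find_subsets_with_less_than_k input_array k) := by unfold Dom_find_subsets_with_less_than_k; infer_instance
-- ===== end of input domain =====

-- B replaces A's per-pair threshold test over all (i,j) by a per-i hand-rolled binary search for the
-- first partner with s[i]+s[j] >= k, then emits the pair/slice tuples unconditionally over that block.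
-- ===== PORT A =====
def pvA_inner (s : List Int) (k : Int) (i : Nat) (j : Nat) (acc : PySem.Set (List Int)) : PySem.Set (List Int) :=
  if _h : j < s.length then
    let si := s.getD i 0
    let sj := s.getD j 0
    let acc' :=
      if si + sj < k then
        let acc1 := if si ≠ sj then PySem.Set.add acc [si, sj] else acc
        PySem.Set.add acc1 (PySem.List.slice s (some (i : Int)) (some ((j : Int) + 1)))
      else acc
    pvA_inner s k i (j + 1) acc'
  else acc
termination_by s.length - j

def pvA_outer (s : List Int) (k : Int) (i : Nat) (acc : PySem.Set (List Int)) : PySem.Set (List Int) :=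
  if _h : i < s.length then
    pvA_outer s k (i + 1) (pvA_inner s k i i acc)
  else acc
termination_by s.length - i

def find_subsets_with_less_than_k (input_array : List Int) (k : Int) : List (List Int) :=
  let filtered := input_array.filter (fun v => v < k)
  let s := PySem.List.sorted filtered (fun x => x) false
  pvA_outer s k 0 PySem.Set.empty

-- ===== PORT B =====
def pvB_lb (s : List Int) (x : Int) (lo hi : Nat) : Nat :=
  if _h : lo < hi then
    let mid := (lo + hi) / 2
    if s.getD mid 0 < x then pvB_lb s x (mid + 1) hi else pvB_lb s x lo mid
  else lo
termination_by hi - lo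
decreasing_by all_goals omega

def pvB_emit (base : Int) (seg : List Int) (pre : List Int) (acc : PySem.Set (List Int)) : PySem.Set (List Int) :=
  match seg with
  | [] => acc
  | v :: rest =>
      let acc1 := if v ≠ base then PySem.Set.add acc [base, v] else acc
      let pre' := pre ++ [v]
      pvB_emit base rest pre' (PySem.Set.add acc1 pre')

def pvB_outer (s : List Int) (k : Int) (i : Nat) (acc : PySem.Set (List Int)) : PySem.Set (List Int) :=
  if _h : i < s.length then
    let base := s.getD i 0
    let lo := pvB_lb s (k - base) i s.length
    pvB_outer s k (i + 1) (pvB_emit base (PySem.List.slice s (some (i : Int)) (some (lo : Int))) [] acc)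
  else acc
termination_by s.length - i

def find_subsets_with_less_than_k_alt (input_array : List Int) (k : Int) : List (List Int) :=
  let s := PySem.List.sorted (input_array.filter (fun v => v < k)) (fun x => x) false
  pvB_outer s k 0 PySem.Set.empty

-- ===== PRECONDITION & SPEC =====
def Spec_find_subsets_with_less_than_k (input_array : List Int) (k : Int) (out : List (List Int)) : Prop := out = find_subsets_with_less_than_k_alt input_array k
instance (input_array : List Int) (k : Int) (out : List (List Int)) : Decidable (Spec_find_subsets_with_less_than_k input_array k out) := by unfold Spec_find_subsets_with_less_than_k; infer_instance

-- ===== CLAIM (what is proved, stated in full; the proofs are below) =====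
def Claim_equal_find_subsets_with_less_than_k : Prop := ∀ (input_array : List Int) (k : Int), Dom_find_subsets_with_less_than_k input_array k → Spec_find_subsets_with_less_than_k input_array k (find_subsets_with_less_than_k input_array k)

-- ===== LEMMAS AND PROOFS =====
-- lower-bound search correctness on a (getD-)monotone list
theorem pvB_lb_spec (s : List Int) (x : Int)
    (hm : ∀ p q : Nat, p ≤ q → q < s.length → s.getD p 0 ≤ s.getD q 0) :
    ∀ (d lo hi : Nat), hi - lo ≤ d → lo ≤ hi → hi ≤ s.length →
      (lo ≤ pvB_lb s x lo hi ∧ pvB_lb s x lo hi ≤ hi) ∧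
      (∀ j, lo ≤ j → j < pvB_lb s x lo hi → s.getD j 0 < x) ∧
      (∀ j, pvB_lb s x lo hi ≤ j → j < hi → ¬ s.getD j 0 < x) := by
  intro d
  induction d with
  | zero =>
      intro lo hi hd hlh hhl
      have : hi = lo := by omega
      subst this
      rw [pvB_lb]
      simp only [lt_irrefl, dite_false]
      refine ⟨⟨le_refl _, le_refl _⟩, ?_, ?_⟩ <;> intro j h1 h2 <;> omega
  | succ d ih =>
      intro lo hi hd hlh hhl
      rw [pvB_lb]
      by_cases h : lo < hi
      · simp only [h, dite_true]
        set mid := (lo + hi) / 2 with hmid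
        have hmlo : lo ≤ mid := by omega
        have hmhi : mid < hi := by omega
        by_cases hc : s.getD mid 0 < x
        · simp only [hc, if_true]
          obtain ⟨⟨r1, r2⟩, r3, r4⟩ := ih (mid + 1) hi (by omega) (by omega) hhl
          refine ⟨⟨by omega, r2⟩, ?_, r4⟩
          intro j hj1 hj2
          by_cases hjm : j ≤ mid
          · calc s.getD j 0 ≤ s.getD mid 0 := hm j mid hjm (by omega)
              _ < x := hc
          · exact r3 j (by omega) hj2
        · simp only [hc, if_false]
          obtain ⟨⟨r1, r2⟩, r3, r4⟩ := ih lo mid (by omega) (by omega) (by omega)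
          refine ⟨⟨r1, by omega⟩, r3, ?_⟩
          intro j hj1 hj2 hlt
          by_cases hjm : mid ≤ j
          · exact hc (lt_of_le_of_lt (hm mid j hjm (by omega)) hlt)
          · exact r4 j hj1 (by omega) hlt
      · simp only [h, dite_false]
        refine ⟨⟨le_refl _, by omega⟩, ?_, ?_⟩ <;> intro j h1 h2 <;> omega

-- A's inner loop adds nothing once the pair condition fails for every remaining j
theorem pvA_inner_stop (s : List Int) (k : Int) (i : Nat) :
    ∀ (d j : Nat) (acc : PySem.Set (List Int)), s.length - j ≤ d →
      (∀ j', j ≤ j' → j' < s.length → ¬ (s.getD i 0 + s.getD j' 0 < k)) →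
      pvA_inner s k i j acc = acc := by
  intro d
  induction d with
  | zero =>
      intro j acc hd hno
      rw [pvA_inner]
      simp only [show ¬ j < s.length by omega, dite_false]
  | succ d ih =>
      intro j acc hd hno
      rw [pvA_inner]
      by_cases h : j < s.length
      · simp only [h, dite_true, hno j (le_refl _) h, if_false]
        exact ih (j + 1) acc (by omega) (fun j' h1 h2 => hno j' (by omega) h2)
      · simp only [h, dite_false]

theorem slice_cons_head (s : List Int) (j m : Nat) (hj : j < m) (hms : m ≤ s.length) :
    PySem.List.slice s (some (j : Int)) (some (m : Int)) =
      s.getD j 0 :: PySem.List.slice s (some ((j : Int) + 1)) (some (m : Int)) := by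
  have h1 : ((j : Int) + 1) = ((j + 1 : Nat) : Int) := by push_cast; ring
  rw [h1, PySem.List.slice_natCast, PySem.List.slice_natCast]
  have hjl : j < s.length := by omega
  rw [List.drop_eq_getElem_cons hjl, List.getD_eq_getElem s 0 hjl]
  have : m - j = (m - (j + 1)) + 1 := by omega
  rw [this, List.take_succ_cons]

theorem slice_snoc (s : List Int) (i j : Nat) (hij : i ≤ j) (hj : j < s.length) :
    PySem.List.slice s (some (i : Int)) (some (j : Int)) ++ [s.getD j 0] =
      PySem.List.slice s (some (i : Int)) (some ((j : Int) + 1)) := by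
  have h1 : ((j : Int) + 1) = ((j + 1 : Nat) : Int) := by push_cast; ring
  rw [h1, PySem.List.slice_natCast, PySem.List.slice_natCast]
  have : j + 1 - i = (j - i) + 1 := by omega
  rw [this, List.take_add_one]
  congr 1
  have hji : j - i < (s.drop i).length := by simp; omega
  rw [List.getElem?_eq_getElem hji]
  simp only [List.getElem_drop, Option.toList_some]
  rw [List.getD_eq_getElem s 0 hj]
  congr 2
  omega

theorem pvA_inner_eq_emit (s : List Int) (k : Int) (i m : Nat)
    (hms : m ≤ s.length)
    (hcond : ∀ j', i ≤ j' → j' < m → s.getD i 0 + s.getD j' 0 < k)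
    (hncond : ∀ j', m ≤ j' → j' < s.length → ¬ (s.getD i 0 + s.getD j' 0 < k)) :
    ∀ (d j : Nat) (acc : PySem.Set (List Int)), m - j ≤ d → i ≤ j → j ≤ m →
      pvA_inner s k i j acc =
        pvB_emit (s.getD i 0) (PySem.List.slice s (some (j : Int)) (some (m : Int)))
          (PySem.List.slice s (some (i : Int)) (some (j : Int))) acc := by
  intro d
  induction d with
  | zero =>
      intro j acc hd hij hjm
      have hjm' : j = m := by omega
      subst hjm'
      rw [PySem.List.slice_natCast]
      simp only [Nat.sub_self, List.take_zero, pvB_emit]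
      exact pvA_inner_stop s k i s.length j acc (by omega)
        (fun j' h1 h2 => hncond j' (by omega) h2)
  | succ d ih =>
      intro j acc hd hij hjm
      by_cases hjm' : j < m
      · have hjl : j < s.length := by omega
        rw [slice_cons_head s j m hjm' hms]
        rw [pvA_inner]
        simp only [hjl, dite_true, hcond j hij hjm', if_true, pvB_emit]
        rw [ih (j + 1) _ (by omega) (by omega) (by omega)]
        rw [slice_snoc s i j hij hjl]
        congr 2
        split_ifs with h1 h2 <;> simp_all [eq_comm]
      · have : j = m := by omega
        subst this
        rw [PySem.List.slice_natCast]
        simp only [Nat.sub_self, List.take_zero, pvB_emit]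
        exact pvA_inner_stop s k i s.length j acc (by omega)
          (fun j' h1 h2 => hncond j' (by omega) h2)

theorem pvA_outer_eq (s : List Int) (k : Int)
    (hm : ∀ p q : Nat, p ≤ q → q < s.length → s.getD p 0 ≤ s.getD q 0) :
    ∀ (d i : Nat) (acc : PySem.Set (List Int)), s.length - i ≤ d →
      pvA_outer s k i acc = pvB_outer s k i acc := by
  intro d
  induction d with
  | zero =>
      intro i acc hd
      rw [pvA_outer, pvB_outer]
      simp only [show ¬ i < s.length by omega, dite_false]
  | succ d ih =>
      intro i acc hd
      rw [pvA_outer, pvB_outer]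
      by_cases h : i < s.length
      · simp only [h, dite_true]
        obtain ⟨⟨b1, b2⟩, b3, b4⟩ :=
          pvB_lb_spec s (k - s.getD i 0) hm s.length i s.length (by omega) (by omega) (le_refl _)
        rw [pvA_inner_eq_emit s k i (pvB_lb s (k - s.getD i 0) i s.length) b2
              (fun j' h1 h2 => by have := b3 j' h1 h2; omega)
              (fun j' h1 h2 => by have := b4 j' h1 h2; omega)
              (pvB_lb s (k - s.getD i 0) i s.length) i acc (by omega) (le_refl _) b1]
        rw [show PySem.List.slice s (some (i : Int)) (some (i : Int)) = [] by
              rw [PySem.List.slice_natCast]; simp]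
        exact ih (i + 1) _ (by omega)
      · simp only [h, dite_false]

theorem ports_agree (input_array : List Int) (k : Int) :
    find_subsets_with_less_than_k input_array k = find_subsets_with_less_than_k_alt input_array k := by
  unfold find_subsets_with_less_than_k find_subsets_with_less_than_k_alt
  set s := PySem.List.sorted (input_array.filter (fun v => v < k)) (fun x => x) false with hs
  have hpw : s.Pairwise (· ≤ ·) := by
    have := PySem.List.sorted_pairwise (input_array.filter (fun v => v < k)) (fun x => x)
    simpa using this
  have hm : ∀ p q : Nat, p ≤ q → q < s.length → s.getD p 0 ≤ s.getD q 0 := by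
    intro p q hpq hq
    rcases Nat.lt_or_ge p q with hlt | hge
    · have := List.pairwise_iff_getElem.mp hpw p q (by omega) hq hlt
      rwa [List.getD_eq_getElem s 0 (by omega), List.getD_eq_getElem s 0 hq]
    · have : p = q := by omega
      subst this; rfl
  exact pvA_outer_eq s k hm s.length 0 PySem.Set.empty (by omega)

-- ===== VERDICT (by name: the statement is the Claim_ definition above) =====
theorem find_subsets_with_less_than_k_spec : Claim_equal_find_subsets_with_less_than_k := by
  intro input_array k _hdom
  unfold Spec_find_subsets_with_less_than_k
  exact ports_agree input_array k
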